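-- pv_equiv track=rewrite | github.com/csci3320/Fall2024.Day29.Prep.Dijkstras | dijkstras.py | find_connecting_flights
-- ===== SOURCE A (Python) =====
-- flights = set([
--   ("ATL", "OMA", 100),
--   ("ATL", "SFO", 100),
--   ("ATL", "LAX", 100),
--   ("ATL", "KC", 100),
--   ("OMA", "KC", 100),
--   ("LAX", "KC", 100),
--   ("SFO", "LAX", 50)
-- ])
--
-- def find_connecting_flights(parent):
--   connections = set()
--   for flight in flights:
--     if flight[0] == parent:
--       connections.add((flight[1], flight[2]))
--     if flight[1] == parent:
--       connections.add((flight[0], flight[2]))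
--   return connections
-- ===== SOURCE B (Python) =====
-- flights = set([
--   ("ATL", "OMA", 100),
--   ("ATL", "SFO", 100),
--   ("ATL", "LAX", 100),
--   ("ATL", "KC", 100),
--   ("OMA", "KC", 100),
--   ("LAX", "KC", 100),
--   ("SFO", "LAX", 50)
-- ])
--
-- # Precompute an adjacency index once at module load: no per-call scan of flights.
-- _adj = {}
-- for _a, _b, _w in flights:
--     _adj.setdefault(_a, set()).add((_b, _w))
--     _adj.setdefault(_b, set()).add((_a, _w))
--
-- def find_connecting_flights(parent):
--     return set(_adj.get(parent, set()))
-- ===== Notes on version B (the rewrite author's own statement) =====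
-- stated objective: alternative
-- what changed: B builds an adjacency index over the flights set once at module load and answers each call by a single dict lookup (copied to a fresh set), instead of A's per-call scan over all flights with two membership tests per edge.
import Mathlib
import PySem

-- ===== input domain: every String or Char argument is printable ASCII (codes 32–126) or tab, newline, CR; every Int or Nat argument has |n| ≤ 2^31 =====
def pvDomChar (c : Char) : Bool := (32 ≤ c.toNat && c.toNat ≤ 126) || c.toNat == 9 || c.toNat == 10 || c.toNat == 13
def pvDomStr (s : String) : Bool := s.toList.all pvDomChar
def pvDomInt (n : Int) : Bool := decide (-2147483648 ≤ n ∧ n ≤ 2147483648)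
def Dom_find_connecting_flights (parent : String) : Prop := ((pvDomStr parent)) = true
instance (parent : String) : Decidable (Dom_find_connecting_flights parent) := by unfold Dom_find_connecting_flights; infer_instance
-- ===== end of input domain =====

-- B replaces A's per-call scan of all flights by an adjacency index built once; objective: alternative (same cost at this fixed tiny graph, different shape).

-- the module-level 'flights' set (distinct triples, insertion order)
def flightsList : List (String × String × Int) :=
  [("ATL", "OMA", 100), ("ATL", "SFO", 100), ("ATL", "LAX", 100), ("ATL", "KC", 100),
   ("OMA", "KC", 100), ("LAX", "KC", 100), ("SFO", "LAX", 50)]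

-- ===== PORT A =====
def find_connecting_flights (parent : String) : List (String × Int) :=
  flightsList.foldl (fun connections flight =>
    let connections :=
      if flight.1 == parent then PySem.Set.add connections (flight.2.1, flight.2.2)
      else connections
    if flight.2.1 == parent then PySem.Set.add connections (flight.1, flight.2.2)
    else connections) PySem.Set.empty

-- ===== PORT B =====
-- adjacency index built once over flightsList (B's module-level _adj)
def flightsAdj : PySem.Dict String (PySem.Set (String × Int)) :=
  flightsList.foldl (fun d f =>
    let d := d.insert f.1 (PySem.Set.add (d.getD f.1 PySem.Set.empty) (f.2.1, f.2.2))
    d.insert f.2.1 (PySem.Set.add (d.getD f.2.1 PySem.Set.empty) (f.1, f.2.2)))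
    PySem.Dict.empty

def find_connecting_flights_alt (parent : String) : List (String × Int) :=
  PySem.Set.ofList (flightsAdj.getD parent PySem.Set.empty)

-- ===== PRECONDITION & SPEC =====
def Spec_find_connecting_flights (parent : String) (out : List (String × Int)) : Prop := out = find_connecting_flights_alt parent
instance (parent : String) (out : List (String × Int)) : Decidable (Spec_find_connecting_flights parent out) := by unfold Spec_find_connecting_flights; infer_instance

-- ===== CLAIM (what is proved, stated in full; the proofs are below) =====
def Claim_equal_find_connecting_flights : Prop := ∀ (parent : String), Dom_find_connecting_flights parent → Spec_find_connecting_flights parent (find_connecting_flights parent)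

-- ===== LEMMAS AND PROOFS =====
-- Only the five node names ever matter: for any other parent both ports return [].
lemma find_connecting_flights_other (parent : String)
    (h1 : parent ≠ "ATL") (h2 : parent ≠ "OMA") (h3 : parent ≠ "SFO")
    (h4 : parent ≠ "LAX") (h5 : parent ≠ "KC") :
    find_connecting_flights parent = find_connecting_flights_alt parent := by
  simp [find_connecting_flights, find_connecting_flights_alt, flightsList, flightsAdj,
    PySem.Dict.getD, PySem.Dict.get?, PySem.Dict.insert, PySem.Dict.empty,
    PySem.Set.add, PySem.Set.empty, PySem.Set.ofList, PySem.Set.contains,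
    Ne.symm h1, Ne.symm h2, Ne.symm h3, Ne.symm h4, Ne.symm h5]

-- ===== VERDICT (by name: the statement is the Claim_ definition above) =====
theorem find_connecting_flights_spec : Claim_equal_find_connecting_flights := by
  intro parent _
  unfold Spec_find_connecting_flights
  by_cases h1 : parent = "ATL"; · subst h1; decide
  by_cases h2 : parent = "OMA"; · subst h2; decide
  by_cases h3 : parent = "SFO"; · subst h3; decide
  by_cases h4 : parent = "LAX"; · subst h4; decide
  by_cases h5 : parent = "KC"; · subst h5; decide
  exact find_connecting_flights_other parent h1 h2 h3 h4 h5
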